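-- pv_equiv track=rewrite | github.com/haesleinhuepf/git-bob | src/git_bob/_utilities.py | append_result
-- ===== SOURCE A (Python) =====
-- POSSBILE_MARKDOWN_FENCES = ["```python", "```Python", "```nextflow", "```java", "```javascript", "```macro", "```groovy", "```cmd"
--                            "```jython", "```md", "```markdown", "```plaintext", "```tex", "```latex",
--                            "```txt", "```csv", "```yml", "```yaml", "```json", "```JSON", "```py", "```svg", "```xml", "<FILE>", "```"]
--
-- def append_result(a, b):
--     """
--     Appends two string, which might be produced by LLMs. E.g. in case the first thing contains ```python and the second
--     starts with ```python, the beginning of the second string is removed.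
--     """
--     if len(a) == 0:
--         return b
--     if len(b) == 0:
--         return a
--
--     possible_beginnings = POSSBILE_MARKDOWN_FENCES
--
--     for beginning in possible_beginnings:
--         if beginning in a and b.startswith(beginning + "\n"):
--             b = b[len(beginning):]
--             return a + b
--     return a + b
-- ===== SOURCE B (Python) =====
-- POSSBILE_MARKDOWN_FENCES = ["```python", "```Python", "```nextflow", "```java", "```javascript", "```macro", "```groovy", "```cmd"
--                            "```jython", "```md", "```markdown", "```plaintext", "```tex", "```latex",
--                            "```txt", "```csv", "```yml", "```yaml", "```json", "```JSON", "```py", "```svg", "```xml", "<FILE>", "```"]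
--
-- # A character trie of all fence strings, built once at import time.
-- # A node is a dict mapping each next character to a child node; the key ""
-- # marks that the path from the root spells a complete fence.
-- _TRIE = {}
-- for _f in POSSBILE_MARKDOWN_FENCES:
--     _node = _TRIE
--     for _ch in _f:
--         _node = _node.setdefault(_ch, {})
--     _node[""] = True
--
--
-- def append_result(a, b):
--     """Append b to a, dropping b's leading fence line when a already contains it.
--
--     Instead of testing b against every fence with startswith, walk b's
--     characters through the trie: the walk stops at the first newline, at a
--     character with no trie edge, or at b's end.  A fence f satisfies
--     b.startswith(f + "\n") exactly when the walk stops on a newline at a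
--     terminal trie node (fences contain no newline, so f must be b's whole
--     first line).
--     """
--     if len(a) == 0:
--         return b
--     if len(b) == 0:
--         return a
--     node = _TRIE
--     i = 0
--     n = len(b)
--     while i < n and b[i] != "\n" and b[i] in node:
--         node = node[b[i]]
--         i += 1
--     if i < n and b[i] == "\n" and "" in node and b[:i] in a:
--         return a + b[i:]
--     return a + b
-- ===== Notes on version B (the rewrite author's own statement) =====
-- stated objective: alternative
-- what changed: B builds a character trie of the fence strings once and, instead of A's loop testing b against every fence (a substring scan of a plus a startswith on b per fence), walks b's characters through the trie up to the first newline and strips exactly when the walk ends on a newline at a terminal node whose spelled prefix occurs in a; correct because fences contain no newline, so only b's whole first line can satisfy b.startswith(fence+' ').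
import Mathlib
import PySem

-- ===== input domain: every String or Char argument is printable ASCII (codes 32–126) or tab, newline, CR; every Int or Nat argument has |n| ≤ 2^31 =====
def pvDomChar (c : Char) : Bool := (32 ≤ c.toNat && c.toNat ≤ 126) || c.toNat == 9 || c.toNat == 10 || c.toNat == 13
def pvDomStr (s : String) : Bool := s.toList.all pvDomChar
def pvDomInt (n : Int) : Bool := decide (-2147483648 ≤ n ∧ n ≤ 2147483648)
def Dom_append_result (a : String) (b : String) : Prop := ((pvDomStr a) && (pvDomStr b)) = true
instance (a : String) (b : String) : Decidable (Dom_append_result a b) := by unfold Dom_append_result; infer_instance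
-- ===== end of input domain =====

-- B replaces A's per-fence scan (substring test + startswith for each fence) by a single
-- walk of b's first line through a character trie of the fences built once (alternative
-- algorithm; equal return value everywhere).

-- ===== PORT A =====
-- the module constant (Python's implicit literal concatenation makes "```cmd```jython" ONE entry)
def pvFences : List (List Char) :=
  ["```python".toList, "```Python".toList, "```nextflow".toList, "```java".toList,
   "```javascript".toList, "```macro".toList, "```groovy".toList, "```cmd```jython".toList,
   "```md".toList, "```markdown".toList, "```plaintext".toList, "```tex".toList,
   "```latex".toList, "```txt".toList, "```csv".toList, "```yml".toList, "```yaml".toList,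
   "```json".toList, "```JSON".toList, "```py".toList, "```svg".toList, "```xml".toList,
   "<FILE>".toList, "```".toList]

-- A's for-loop over the fence list, transliterated step for step
def pvLoopA (fences : List (List Char)) (a b : List Char) : List Char :=
  match fences with
  | [] => a ++ b
  | f :: fs =>
    if PySem.Chars.isIn f a && PySem.Chars.startswith b (f ++ ['\n'])
    then a ++ PySem.List.slice b (some (f.length : Int)) none
    else pvLoopA fs a b

def append_result (a : String) (b : String) : String :=
  if PySem.Str.len a = 0 then b
  else if PySem.Str.len b = 0 then a
  else String.ofList (pvLoopA pvFences a.toList b.toList)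

-- ===== PORT B =====
-- Source B's trie of nested dicts: a node is a terminal flag (Python's "" key) plus an
-- association list of children (explicit child-list type, mutual pair)
mutual
inductive PvTrie where
  | node : Bool → PvChildren → PvTrie
inductive PvChildren where
  | nil : PvChildren
  | cons : Char → PvTrie → PvChildren → PvChildren
end

def pvTerm : PvTrie → Bool
  | .node t _ => t

def pvKids : PvTrie → PvChildren
  | .node _ ch => ch

def pvEmpty : PvTrie := .node false .nil

-- dict lookup node[c] (first match)
def pvGetChild : PvChildren → Char → Option PvTrie
  | .nil, _ => none
  | .cons d t rest, c => if d = c then some t else pvGetChild rest c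

-- dict store node[c] = t' (overwrite in place, else append)
def pvSetChild : PvChildren → Char → PvTrie → PvChildren
  | .nil, c, t' => .cons c t' .nil
  | .cons d t rest, c, t' => if d = c then .cons d t' rest else .cons d t (pvSetChild rest c t')

-- Source B's build loop "node = node.setdefault(ch, {}) …; node[''] = True": the in-place
-- dict descent ported as a functional recursive insert producing the same trie
def pvInsert (t : PvTrie) : List Char → PvTrie
  | [] => .node true (pvKids t)
  | c :: cs =>
    .node (pvTerm t)
      (pvSetChild (pvKids t) c
        (pvInsert (match pvGetChild (pvKids t) c with | some u => u | none => pvEmpty) cs))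

-- the module-level _TRIE built once from the fence list
def pvTrie : PvTrie := pvFences.foldl pvInsert pvEmpty

-- Source B's while loop: walk b through the trie until the first newline, a missing edge, or b's end
def pvLoopB : PvTrie → Nat → List Char → PvTrie × Nat
  | t, i, [] => (t, i)
  | t, i, c :: cs =>
    if c = '\n' then (t, i)
    else
      match pvGetChild (pvKids t) c with
      | some t' => pvLoopB t' (i + 1) cs
      | none => (t, i)

-- Source B's body after the guards; Python's `i < n and b[i] == "\n"` is ported as
-- "the head of b[i:] is '\n'" (exact: b[i] exists and equals '\n')
def pvCoreB (a b : List Char) : List Char :=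
  let r := pvLoopB pvTrie 0 b
  if ((b.drop r.2).headD ' ' = '\n') && pvTerm r.1 && PySem.Chars.isIn (b.take r.2) a
  then a ++ b.drop r.2
  else a ++ b

def append_result_alt (a : String) (b : String) : String :=
  if PySem.Str.len a = 0 then b
  else if PySem.Str.len b = 0 then a
  else String.ofList (pvCoreB a.toList b.toList)

-- ===== PRECONDITION & SPEC =====
def Spec_append_result (a : String) (b : String) (out : String) : Prop := out = append_result_alt a b
instance (a : String) (b : String) (out : String) : Decidable (Spec_append_result a b out) := by unfold Spec_append_result; infer_instance

-- ===== CLAIM (what is proved, stated in full; the proofs are below) =====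
def Claim_equal_append_result : Prop := ∀ (a : String) (b : String), Dom_append_result a b → Spec_append_result a b (append_result a b)

-- ===== LEMMAS AND PROOFS =====

-- no fence in the module constant contains a newline
theorem pvFences_no_newline : ∀ f ∈ pvFences, '\n' ∉ f := by decide

-- if no fence's condition fires, A's loop falls through to a ++ b
theorem pvLoopA_no_match (fences : List (List Char)) (a b : List Char)
    (h : ∀ f ∈ fences, PySem.Chars.startswith b (f ++ ['\n']) = false) :
    pvLoopA fences a b = a ++ b := by
  induction fences with
  | nil => rfl
  | cons f fs ih =>
    simp [pvLoopA, h f (by simp)]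
    exact ih (fun g hg => h g (by simp [hg]))

-- two decompositions at the FIRST newline coincide on the part before it
theorem pv_first_newline_unique (f line t r : List Char)
    (h : f ++ '\n' :: t = line ++ '\n' :: r) (hf : '\n' ∉ f) (hl : '\n' ∉ line) :
    f = line := by
  induction f generalizing line with
  | nil =>
    cases line with
    | nil => rfl
    | cons c l' =>
      simp only [List.nil_append, List.cons_append, List.cons.injEq] at h
      exact absurd (h.1 ▸ List.mem_cons_self) hl
  | cons c f' ih =>
    cases line with
    | nil =>
      simp only [List.cons_append, List.nil_append, List.cons.injEq] at h
      exact absurd (h.1 ▸ List.mem_cons_self) hf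
    | cons c' l' =>
      simp only [List.cons_append, List.cons.injEq] at h
      have := ih l' (by simpa using h.2) (fun hm => hf (List.mem_cons_of_mem _ hm))
        (fun hm => hl (List.mem_cons_of_mem _ hm))
      simp [h.1, this]

-- a fence (newline-free) satisfies b.startswith(fence + "\n") iff it IS b's first line
theorem pv_startswith_iff_line (f L t : List Char)
    (hf : '\n' ∉ f) (hL : '\n' ∉ L) :
    (PySem.Chars.startswith (L ++ '\n' :: t) (f ++ ['\n']) = true ↔ f = L) := by
  rw [PySem.Chars.startswith_iff]
  constructor
  · rintro ⟨s, hs⟩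
    have h2 : f ++ '\n' :: s = L ++ '\n' :: t := by simpa using hs
    exact pv_first_newline_unique f L s t h2 hf hL
  · intro hfl
    exact ⟨t, by rw [hfl]; simp⟩

-- A's loop when b's first line is `line`: a single membership + substring decision
theorem pvLoopA_line (fences : List (List Char)) (a b line : List Char)
    (hiff : ∀ f ∈ fences, (PySem.Chars.startswith b (f ++ ['\n']) = true ↔ f = line)) :
    pvLoopA fences a b =
      if fences.contains line && PySem.Chars.isIn line a
      then a ++ PySem.List.slice b (some (line.length : Int)) none
      else a ++ b := by
  induction fences with
  | nil => simp [pvLoopA]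
  | cons f fs ih =>
    have hf := hiff f (by simp)
    have ih' := ih (fun g hg => hiff g (by simp [hg]))
    by_cases hfl : f = line
    · subst hfl
      have hsw : PySem.Chars.startswith b (f ++ ['\n']) = true := hf.mpr rfl
      by_cases hin : PySem.Chars.isIn f a = true
      · simp [pvLoopA, hsw, hin]
      · have hin' : PySem.Chars.isIn f a = false := by simpa using hin
        simp [pvLoopA, hsw, hin', ih']
    · have hsw : PySem.Chars.startswith b (f ++ ['\n']) = false := by
        rcases h : PySem.Chars.startswith b (f ++ ['\n']) with _ | _
        · rfl
        · exact absurd (hf.mp h) hfl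
      simp [pvLoopA, hsw, ih', Ne.symm hfl]

-- partial trie walk along a word (proof-side mirror of Source B's loop, without the index)
def pvTrace : PvTrie → List Char → Option PvTrie
  | t, [] => some t
  | t, c :: cs =>
    match pvGetChild (pvKids t) c with
    | some t' => pvTrace t' cs
    | none => none

-- word membership in the trie
def pvAccepted (t : PvTrie) (w : List Char) : Bool :=
  match pvTrace t w with
  | some u => pvTerm u
  | none => false

theorem pvGetChild_set_self : ∀ (ch : PvChildren) (c : Char) (t' : PvTrie),
    pvGetChild (pvSetChild ch c t') c = some t'
  | .nil, c, t' => by simp [pvSetChild, pvGetChild]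
  | .cons d t rest, c, t' => by
    by_cases hdc : d = c
    · simp [pvSetChild, hdc, pvGetChild]
    · simp [pvSetChild, hdc, pvGetChild, pvGetChild_set_self rest c t']

theorem pvGetChild_set_ne : ∀ (ch : PvChildren) (c : Char) (t' : PvTrie) (d : Char),
    d ≠ c → pvGetChild (pvSetChild ch c t') d = pvGetChild ch d
  | .nil, c, t', d, h => by simp [pvSetChild, pvGetChild, Ne.symm h]
  | .cons e t rest, c, t', d, h => by
    by_cases hed : e = d
    · subst hed
      simp [pvSetChild, pvGetChild, h]
    · by_cases hec : e = c
      · subst hec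
        simp [pvSetChild, pvGetChild, hed]
      · simp [pvSetChild, pvGetChild, hec, hed, pvGetChild_set_ne rest c t' d h]

theorem pvAccepted_empty (w : List Char) : pvAccepted pvEmpty w = false := by
  cases w with
  | nil => rfl
  | cons c cs => rfl

theorem pvAccepted_insert (w : List Char) :
    ∀ (t : PvTrie) (L : List Char),
      pvAccepted (pvInsert t w) L = (decide (L = w) || pvAccepted t L) := by
  induction w with
  | nil =>
    intro t L
    cases t with | node term ch =>
    cases L with
    | nil => simp [pvAccepted, pvTrace, pvInsert, pvTerm]
    | cons d ds => simp [pvAccepted, pvTrace, pvInsert, pvKids]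
  | cons c cs ih =>
    intro t L
    cases t with | node term ch =>
    cases L with
    | nil => simp [pvAccepted, pvTrace, pvInsert, pvTerm]
    | cons d ds =>
      by_cases hdc : d = c
      · subst hdc
        simp only [pvAccepted, pvTrace, pvInsert, pvKids, pvGetChild_set_self]
        cases hg : pvGetChild ch d with
        | some u =>
          have h1 := ih u ds
          simp only [pvAccepted] at h1
          simp [h1]
        | none =>
          have h1 := ih pvEmpty ds
          simp only [pvAccepted] at h1
          have he := pvAccepted_empty ds
          simp only [pvAccepted] at he
          simp [h1, he]
      · simp only [pvAccepted, pvTrace, pvInsert, pvKids,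
          pvGetChild_set_ne _ _ _ _ hdc]
        have hds : (decide (d :: ds = c :: cs)) = false := by simp [hdc]
        cases hg : pvGetChild ch d with
        | some u => simp [hdc]
        | none => simp [hdc]

theorem pvAccepted_foldl (fs : List (List Char)) :
    ∀ (t : PvTrie) (L : List Char),
      pvAccepted (fs.foldl pvInsert t) L = (pvAccepted t L || fs.contains L) := by
  induction fs with
  | nil => intro t L; simp
  | cons f fs ih =>
    intro t L
    simp only [List.foldl_cons, ih, pvAccepted_insert, List.contains_cons]
    by_cases h : L = f
    · simp [h]
    · simp [h, beq_eq_false_iff_ne.mpr h]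

theorem pvAccepted_trie (L : List Char) : pvAccepted pvTrie L = pvFences.contains L := by
  have := pvAccepted_foldl pvFences pvEmpty L
  rw [pvAccepted_empty] at this
  simpa [pvTrie] using this

-- the walk consumes exactly b's first line when the trie path exists …
theorem pvLoopB_some (L : List Char) :
    ∀ (tr : PvTrie) (i0 : Nat) (r : List Char) (t' : PvTrie),
      '\n' ∉ L → pvTrace tr L = some t' →
      pvLoopB tr i0 (L ++ '\n' :: r) = (t', i0 + L.length) := by
  induction L with
  | nil =>
    intro tr i0 r t' _ htr
    simp only [pvTrace, Option.some.injEq] at htr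
    subst htr
    simp [pvLoopB]
  | cons c cs ih =>
    intro tr i0 r t' hnl htr
    have hc : c ≠ '\n' := fun h => hnl (h ▸ List.mem_cons_self)
    simp only [pvTrace] at htr
    cases hg : pvGetChild (pvKids tr) c with
    | none => rw [hg] at htr; exact absurd htr (by simp)
    | some t1 =>
      rw [hg] at htr
      have := ih t1 (i0 + 1) r t' (fun h => hnl (List.mem_cons_of_mem _ h)) htr
      simp only [List.cons_append, pvLoopB, hg, if_neg hc, this,
        List.length_cons, Prod.mk.injEq]
      exact ⟨trivial, by omega⟩

-- … and dies strictly inside it when the path does not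
theorem pvLoopB_none (L : List Char) :
    ∀ (tr : PvTrie) (i0 : Nat) (r : List Char),
      '\n' ∉ L → pvTrace tr L = none →
      ∃ t'' k, k < L.length ∧ pvLoopB tr i0 (L ++ '\n' :: r) = (t'', i0 + k) := by
  induction L with
  | nil => intro tr i0 r _ htr; exact absurd htr (by simp [pvTrace])
  | cons c cs ih =>
    intro tr i0 r hnl htr
    have hc : c ≠ '\n' := fun h => hnl (h ▸ List.mem_cons_self)
    simp only [pvTrace] at htr
    cases hg : pvGetChild (pvKids tr) c with
    | none =>
      exact ⟨tr, 0, by simp, by simp [pvLoopB, hc, hg]⟩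
    | some t1 =>
      rw [hg] at htr
      obtain ⟨t'', k, hk, hloop⟩ := ih t1 (i0 + 1) r (fun h => hnl (List.mem_cons_of_mem _ h)) htr
      refine ⟨t'', k + 1, by simp [List.length_cons]; omega, ?_⟩
      simp only [List.cons_append, pvLoopB, hg, if_neg hc, hloop,
        Prod.mk.injEq]
      exact ⟨trivial, by omega⟩

-- every string containing '\n' splits at its FIRST newline
theorem pv_first_nl (b : List Char) (h : '\n' ∈ b) :
    ∃ L t, b = L ++ '\n' :: t ∧ '\n' ∉ L := by
  induction b with
  | nil => exact absurd h (by simp)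
  | cons c cs ih =>
    by_cases hc : c = '\n'
    · exact ⟨[], cs, by simp [hc], by simp⟩
    · have : '\n' ∈ cs := by
        rcases List.mem_cons.mp h with h1 | h1
        · exact absurd h1.symm hc
        · exact h1
      obtain ⟨L, t, hb, hL⟩ := ih this
      refine ⟨c :: L, t, by simp [hb], ?_⟩
      intro hm
      rcases List.mem_cons.mp hm with h1 | h1
      · exact hc h1.symm
      · exact hL h1

-- a successful startswith(f + "\n") puts a newline into b
theorem pv_startswith_mem (b f : List Char)
    (h : PySem.Chars.startswith b (f ++ ['\n']) = true) : '\n' ∈ b := by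
  obtain ⟨s, hs⟩ := (PySem.Chars.startswith_iff b (f ++ ['\n'])).mp h
  rw [← hs]; simp

-- the cores agree on every pair of char lists
theorem pvCore_eq (a b : List Char) : pvLoopA pvFences a b = pvCoreB a b := by
  by_cases hnl : '\n' ∈ b
  · obtain ⟨L, t, hb, hL⟩ := pv_first_nl b hnl
    subst hb
    have hiff : ∀ f ∈ pvFences,
        (PySem.Chars.startswith (L ++ '\n' :: t) (f ++ ['\n']) = true ↔ f = L) :=
      fun f hf => pv_startswith_iff_line f L t (pvFences_no_newline f hf) hL
    rw [pvLoopA_line pvFences a _ L hiff]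
    have hsl : PySem.List.slice (L ++ '\n' :: t) (some (L.length : Int)) none = '\n' :: t := by
      rw [PySem.List.slice_from_natCast]
      simp
    cases htr : pvTrace pvTrie L with
    | some t' =>
      have hloop := pvLoopB_some L pvTrie 0 ('\n' :: t).tail t' hL (by simpa using htr)
      have hterm : pvFences.contains L = pvTerm t' := by
        have h2 := pvAccepted_trie L
        simp only [pvAccepted, htr] at h2
        exact h2.symm
      simp only [pvCoreB, List.tail_cons] at *
      rw [hloop]
      cases hpt : pvTerm t' with
      | false =>
        have hnm : L ∉ pvFences := by
          rw [hpt] at hterm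
          simpa using hterm
        simp [hnm]
      | true =>
        have hm : L ∈ pvFences := by
          rw [hpt] at hterm
          simpa using hterm
        simp [hsl, hm]
    | none =>
      have hcont : pvFences.contains L = false := by
        have h2 := pvAccepted_trie L
        simp only [pvAccepted, htr] at h2
        exact h2.symm
      obtain ⟨t'', k, hk, hloop⟩ := pvLoopB_none L pvTrie 0 t hL htr
      have hnm : L ∉ pvFences := by simpa using hcont
      have hidx : (L ++ '\n' :: t)[k]?.getD ' ' = L[k] := by
        rw [List.getElem?_append_left hk]
        simp [List.getElem?_eq_getElem hk]
      have hne : L[k] ≠ '\n' := fun h => hL (h ▸ List.getElem_mem hk)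
      simp only [pvCoreB]
      rw [hloop]
      simp [hnm, hidx, hne]
  · have hsw : ∀ f ∈ pvFences, PySem.Chars.startswith b (f ++ ['\n']) = false := by
      intro f _
      rcases h : PySem.Chars.startswith b (f ++ ['\n']) with _ | _
      · rfl
      · exact absurd (pv_startswith_mem b f h) hnl
    rw [pvLoopA_no_match pvFences a b hsw]
    have hhead : b[(pvLoopB pvTrie 0 b).2]?.getD ' ' ≠ '\n' := by
      intro hh
      cases hx : b[(pvLoopB pvTrie 0 b).2]? with
      | none => rw [hx] at hh; exact absurd hh (by decide)
      | some c =>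
        rw [hx] at hh
        simp only [Option.getD_some] at hh
        exact hnl (hh ▸ List.mem_of_getElem? hx)
    simp [pvCoreB, hhead]

-- ===== VERDICT (by name: the statement is the Claim_ definition above) =====
theorem append_result_spec : Claim_equal_append_result := by
  intro a b _
  unfold Spec_append_result append_result append_result_alt
  rw [pvCore_eq]
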